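-- pv_equiv track=rewrite | github.com/spranavi-arch/document-generator | formatting/utils/template_builder.py | merge_diff_with_heuristic_candidates
-- ===== SOURCE A (Python) =====
-- def _spans_overlap(a: dict, b: dict) -> bool:
--     """True if two candidates overlap (same para_id, character ranges overlap)."""
--     if a.get("para_id") != b.get("para_id"):
--         return False
--     s1, e1 = a.get("start_char", 0), a.get("end_char", 0)
--     s2, e2 = b.get("start_char", 0), b.get("end_char", 0)
--     return s1 < e2 and s2 < e1
--
-- def merge_diff_with_heuristic_candidates(
--     para_map: list[dict],
--     scalar_candidates: list[dict],
--     block_candidates: list[dict],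
--     diff_candidates: list[dict],
-- ) -> tuple[list[dict], list[dict]]:
--     """
--     Prefer diff-based candidates over heuristics for overlapping spans.
--     Remove any scalar candidate that overlaps a diff candidate; then add all diff candidates.
--     Block candidates are unchanged.
--     """
--     scalar_filtered = [
--         c for c in scalar_candidates
--         if not any(_spans_overlap(c, d) for d in diff_candidates)
--     ]
--     scalar_merged = scalar_filtered + list(diff_candidates)
--     return scalar_merged, block_candidates
-- ===== SOURCE B (Python) =====
-- def merge_diff_with_heuristic_candidates(
--     para_map,
--     scalar_candidates,
--     block_candidates,
--     diff_candidates,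
-- ):
--     # Index the diff candidates once by para_id so each scalar candidate is
--     # checked only against the spans of its own paragraph.
--     pairs = [
--         (d.get("para_id"), (d.get("start_char", 0), d.get("end_char", 0)))
--         for d in diff_candidates
--     ]
--     buckets = {}
--     for key, span in pairs:
--         buckets.setdefault(key, []).append(span)
--     merged = []
--     for c in scalar_candidates:
--         s1, e1 = c.get("start_char", 0), c.get("end_char", 0)
--         if not any(s2 < e1 and s1 < e2
--                    for (s2, e2) in buckets.get(c.get("para_id"), [])):
--             merged.append(c)
--     merged.extend(diff_candidates)
--     return merged, block_candidates
-- ===== Notes on version B (the rewrite author's own statement) =====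
-- stated objective: alternative
-- what changed: B builds a dict bucketing diff-candidate spans by para_id once, so each scalar candidate is checked only against the spans of its own paragraph instead of scanning every diff candidate with a per-pair para_id comparison.
import Mathlib
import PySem

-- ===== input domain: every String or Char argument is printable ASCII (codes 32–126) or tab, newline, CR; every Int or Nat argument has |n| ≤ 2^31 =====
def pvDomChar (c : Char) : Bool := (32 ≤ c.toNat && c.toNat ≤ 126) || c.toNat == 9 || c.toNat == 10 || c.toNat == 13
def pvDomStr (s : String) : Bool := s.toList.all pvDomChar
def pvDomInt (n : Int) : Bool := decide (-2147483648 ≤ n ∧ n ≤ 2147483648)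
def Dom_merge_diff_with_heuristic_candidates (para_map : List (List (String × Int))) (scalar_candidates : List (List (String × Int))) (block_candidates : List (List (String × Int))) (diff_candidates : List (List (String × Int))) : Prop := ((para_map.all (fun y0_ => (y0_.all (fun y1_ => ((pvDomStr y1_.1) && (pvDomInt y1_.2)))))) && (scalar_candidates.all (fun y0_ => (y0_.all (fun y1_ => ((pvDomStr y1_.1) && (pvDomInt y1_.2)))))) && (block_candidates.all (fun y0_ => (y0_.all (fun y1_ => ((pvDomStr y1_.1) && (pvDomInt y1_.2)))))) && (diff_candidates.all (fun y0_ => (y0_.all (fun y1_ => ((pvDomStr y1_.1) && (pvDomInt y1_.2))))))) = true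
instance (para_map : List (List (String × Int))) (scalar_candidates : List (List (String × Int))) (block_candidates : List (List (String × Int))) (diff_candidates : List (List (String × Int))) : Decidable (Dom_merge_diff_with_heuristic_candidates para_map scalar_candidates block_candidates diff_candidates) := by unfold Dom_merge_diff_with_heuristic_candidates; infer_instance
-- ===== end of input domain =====

-- B indexes the diff candidates once by para_id so each scalar candidate is checked
-- only against the spans of its own paragraph (a bucket index replaces the scan of all diffs).

-- shared primitive: Python's dict.get on an association list (first match)
def pvGet (c : List (String × Int)) (k : String) : Option Int := (PySem.Dict.mk c).get? k
def pvGetD (c : List (String × Int)) (k : String) (d : Int) : Int := (PySem.Dict.mk c).getD k d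

-- ===== PORT A =====
def spansOverlap (a b : List (String × Int)) : Bool :=
  if pvGet a "para_id" != pvGet b "para_id" then false
  else
    let s1 := pvGetD a "start_char" 0
    let e1 := pvGetD a "end_char" 0
    let s2 := pvGetD b "start_char" 0
    let e2 := pvGetD b "end_char" 0
    decide (s1 < e2) && decide (s2 < e1)

def merge_diff_with_heuristic_candidates (para_map : List (List (String × Int))) (scalar_candidates : List (List (String × Int))) (block_candidates : List (List (String × Int))) (diff_candidates : List (List (String × Int))) : (List (List (String × Int))) × (List (List (String × Int))) :=
  let scalar_filtered := scalar_candidates.filter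
    (fun c => !(diff_candidates.any (fun d => spansOverlap c d)))
  let scalar_merged := scalar_filtered ++ diff_candidates
  (scalar_merged, block_candidates)

-- ===== PORT B =====
def merge_diff_with_heuristic_candidates_alt (para_map : List (List (String × Int))) (scalar_candidates : List (List (String × Int))) (block_candidates : List (List (String × Int))) (diff_candidates : List (List (String × Int))) : (List (List (String × Int))) × (List (List (String × Int))) :=
  let pairs := diff_candidates.map
    (fun d => (pvGet d "para_id", (pvGetD d "start_char" 0, pvGetD d "end_char" 0)))
  let buckets := pairs.foldl
    (fun bs p => bs.modify p.1 [] (fun l => l ++ [p.2])) PySem.Dict.empty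
  let merged := scalar_candidates.foldl
    (fun acc c =>
      let s1 := pvGetD c "start_char" 0
      let e1 := pvGetD c "end_char" 0
      if !((buckets.getD (pvGet c "para_id") []).any
            (fun se => decide (se.1 < e1) && decide (s1 < se.2)))
      then acc ++ [c] else acc) []
  (merged ++ diff_candidates, block_candidates)

-- ===== PRECONDITION & SPEC =====
def Spec_merge_diff_with_heuristic_candidates (para_map : List (List (String × Int))) (scalar_candidates : List (List (String × Int))) (block_candidates : List (List (String × Int))) (diff_candidates : List (List (String × Int))) (out : (List (List (String × Int))) × (List (List (String × Int)))) : Prop := out = merge_diff_with_heuristic_candidates_alt para_map scalar_candidates block_candidates diff_candidates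
instance (para_map : List (List (String × Int))) (scalar_candidates : List (List (String × Int))) (block_candidates : List (List (String × Int))) (diff_candidates : List (List (String × Int))) (out : (List (List (String × Int))) × (List (List (String × Int)))) : Decidable (Spec_merge_diff_with_heuristic_candidates para_map scalar_candidates block_candidates diff_candidates out) := by unfold Spec_merge_diff_with_heuristic_candidates; infer_instance

-- ===== CLAIM (what is proved, stated in full; the proofs are below) =====
def Claim_equal_merge_diff_with_heuristic_candidates : Prop := ∀ (para_map : List (List (String × Int))) (scalar_candidates : List (List (String × Int))) (block_candidates : List (List (String × Int))) (diff_candidates : List (List (String × Int))), Dom_merge_diff_with_heuristic_candidates para_map scalar_candidates block_candidates diff_candidates → Spec_merge_diff_with_heuristic_candidates para_map scalar_candidates block_candidates diff_candidates (merge_diff_with_heuristic_candidates para_map scalar_candidates block_candidates diff_candidates)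

-- ===== LEMMAS AND PROOFS =====

-- B's bucket lookup followed by the inner any equals A's scan of all diff candidates.
lemma bucket_any_eq (diff_candidates : List (List (String × Int))) (c : List (String × Int)) :
    (((diff_candidates.map
        (fun d => (pvGet d "para_id", (pvGetD d "start_char" 0, pvGetD d "end_char" 0)))).foldl
        (fun bs p => bs.modify p.1 [] (fun l => l ++ [p.2])) PySem.Dict.empty).getD
        (pvGet c "para_id") []).any
      (fun se => decide (se.1 < pvGetD c "end_char" 0) && decide (pvGetD c "start_char" 0 < se.2))
    = diff_candidates.any (fun d => spansOverlap c d) := by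
  rw [PySem.Dict.getD_foldl_modify_append]
  simp only [PySem.Dict.getD_empty, List.nil_append, List.filter_map, List.map_map, List.any_map,
    List.any_filter, Function.comp]
  congr 1
  funext d
  simp only [spansOverlap, bne]
  by_cases h : pvGet d "para_id" = pvGet c "para_id"
  · simp [h]; rw [Bool.and_comm]; rfl
  · have h' : pvGet c "para_id" ≠ pvGet d "para_id" := fun hh => h hh.symm
    simp [h, h']

-- ===== VERDICT (by name: the statement is the Claim_ definition above) =====
theorem merge_diff_with_heuristic_candidates_spec : Claim_equal_merge_diff_with_heuristic_candidates := by
  intro para_map scalar_candidates block_candidates diff_candidates _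
  unfold Spec_merge_diff_with_heuristic_candidates
  unfold merge_diff_with_heuristic_candidates merge_diff_with_heuristic_candidates_alt
  simp only [PySem.List.foldl_append_if_eq_filter, List.nil_append]
  refine Prod.ext ?_ rfl
  simp only []
  congr 1
  apply List.filter_congr
  intro c _
  rw [bucket_any_eq]
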